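-- pv_equiv track=rewrite | github.com/sujeong11/Algorithm | Lv. 1 /명예의 전당 (1).py | solution
-- ===== SOURCE A (Python) =====
-- def solution(k, score):
--     answer = []
--     honor = []
--
--     for idx, val in enumerate(score):
--         if idx < k:
--             honor.append(val)
--         else:
--             honor_min_val = min(honor)
--             if honor_min_val < val:
--                 honor.remove(honor_min_val)
--                 honor.append(val)
--
--         answer.append(min(honor))
--
--     return answer
-- ===== SOURCE B (Python) =====
-- def _insort(a, x):
--     # insert x into ascending-sorted a, after any equal elements (binary search + splice)
--     lo, hi = 0, len(a)
--     while lo < hi: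
--         mid = (lo + hi) // 2
--         if a[mid] <= x:
--             lo = mid + 1
--         else:
--             hi = mid
--     return a[:lo] + [x] + a[lo:]
--
--
-- def solution(k, score):
--     heap = []        # ascending-sorted top-k scores so far; minimum is heap[0]
--     answer = []
--     for val in score:
--         if len(heap) < k:
--             heap = _insort(heap, val)
--         elif heap[0] < val:
--             heap = _insort(heap[1:], val)
--         answer.append(heap[0])
--     return answer
-- ===== Notes on version B (the rewrite author's own statement) =====
-- stated objective: alternative
-- what changed: B replaces A's unsorted hall-of-fame list (min() scan plus remove() scan each step) with an ascending-sorted top-k list maintained by binary-search insertion, so the running minimum is read off the head in O(1).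
-- outside the precondition, e.g. on solution(0, [5, 3]): A raises ValueError, B raises IndexError
import Mathlib
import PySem

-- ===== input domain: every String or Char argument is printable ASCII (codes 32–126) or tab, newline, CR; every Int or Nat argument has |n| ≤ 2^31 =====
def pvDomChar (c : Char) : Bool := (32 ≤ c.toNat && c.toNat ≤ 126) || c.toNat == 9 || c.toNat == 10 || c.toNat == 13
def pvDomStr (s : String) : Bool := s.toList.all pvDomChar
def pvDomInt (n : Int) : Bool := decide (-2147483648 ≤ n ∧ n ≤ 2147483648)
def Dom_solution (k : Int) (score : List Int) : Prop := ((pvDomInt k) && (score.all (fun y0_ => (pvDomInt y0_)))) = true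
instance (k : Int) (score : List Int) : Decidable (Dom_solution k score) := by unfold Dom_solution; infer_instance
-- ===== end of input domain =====

-- B keeps the top-k scores in an ascending-sorted list (ordered insert, read the head)
-- instead of A's unsorted list with min()-scan and remove(), inserting by binary search + splice.

-- ===== PORT A =====
-- one iteration of A's loop; state = (answer, honor)
def solutionStepA (k : Int) (st : List Int × List Int) (p : Int × Int) : List Int × List Int :=
  let honor := st.2
  let honor' :=
    if p.1 < k then honor ++ [p.2]
    else
      match PySem.List.min? honor (fun x => x) with
      | none => honor            -- Python raises ValueError (min of empty) here; outside Pre_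
      | some m =>
          if m < p.2 then ((PySem.List.remove? honor m).getD honor) ++ [p.2] else honor
  match PySem.List.min? honor' (fun x => x) with
  | none => (st.1, honor')       -- Python raises ValueError here; outside Pre_
  | some m => (st.1 ++ [m], honor')

def solution (k : Int) (score : List Int) : List Int :=
  ((PySem.List.enumerate score).foldl (solutionStepA k) ([], [])).1

-- ===== PORT B =====
-- _insort's while loop: binary search for the insertion point (after any equal elements)
def insortLoopB (a : List Int) (x : Int) (lo hi : Int) : Int :=
  if h : lo < hi then
    let mid := PySem.Int.floordiv (lo + hi) 2
    if PySem.List.pyGetD a mid 0 ≤ x then   -- a[mid] (mid is always in range here)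
      insortLoopB a x (mid + 1) hi
    else
      insortLoopB a x lo mid
  else lo
termination_by (hi - lo).toNat
decreasing_by
  · have hb := PySem.Int.floordiv_two_mid_bounds (le_of_lt h)
    have hlt : PySem.Int.floordiv (lo + hi) 2 < hi :=
      (PySem.Int.floordiv_lt_iff_lt_mul (by omega)).mpr (by omega)
    omega
  · have hlt : PySem.Int.floordiv (lo + hi) 2 < hi :=
      (PySem.Int.floordiv_lt_iff_lt_mul (by omega)).mpr (by omega)
    omega

-- _insort: a[:lo] + [x] + a[lo:]
def insortB (a : List Int) (x : Int) : List Int :=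
  let lo := insortLoopB a x 0 (a.length : Int)
  PySem.List.slice a none (some lo) ++ [x] ++ PySem.List.slice a (some lo) none

-- one iteration of B's loop; state = (heap, answer)
def solutionStepB (k : Int) (st : List Int × List Int) (val : Int) : List Int × List Int :=
  let heap := st.1
  let heap' :=
    if (heap.length : Int) < k then insortB heap val
    else
      match heap with
      | [] => heap               -- Python raises IndexError (heap[0]) here; outside Pre_
      | h :: t => if h < val then insortB (PySem.List.slice (h :: t) (some 1) none) val else heap
  (heap', st.2 ++ [heap'.headD 0])   -- heap'[0]; heap' is nonempty inside Pre_

def solution_alt (k : Int) (score : List Int) : List Int :=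
  (score.foldl (solutionStepB k) ([], [])).2

-- ===== PRECONDITION & SPEC =====
-- Pre_ excludes k ≤ 0 with a nonempty score, where A raises ValueError (min of empty list).
def Pre_solution (k : Int) (score : List Int) : Prop := score = [] ∨ 1 ≤ k
instance (k : Int) (score : List Int) : Decidable (Pre_solution k score) := by
  unfold Pre_solution; infer_instance

def pvWitness_solution : Int × List Int := (3, [10, 100, 20, 150, 1, 100, 200])

def Spec_solution (k : Int) (score : List Int) (out : List Int) : Prop := out = solution_alt k score
instance (k : Int) (score : List Int) (out : List Int) : Decidable (Spec_solution k score out) := by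
  unfold Spec_solution; infer_instance

-- ===== CLAIM (what is proved, stated in full; the proofs are below) =====
def Claim_equal_solution : Prop := ∀ (k : Int) (score : List Int), Dom_solution k score → Pre_solution k score → Spec_solution k score (solution k score)

-- ===== LEMMAS AND PROOFS =====

-- what the binary-search loop returns: a split point of the sorted list around x
lemma insortLoopB_step (a : List Int) (x : Int) (lo hi : Int) (h : lo < hi) :
    insortLoopB a x lo hi =
      if PySem.List.pyGetD a (PySem.Int.floordiv (lo + hi) 2) 0 ≤ x then
        insortLoopB a x (PySem.Int.floordiv (lo + hi) 2 + 1) hi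
      else insortLoopB a x lo (PySem.Int.floordiv (lo + hi) 2) := by
  rw [insortLoopB]
  simp [h]

lemma insortLoopB_stop (a : List Int) (x : Int) (lo hi : Int) (h : ¬ lo < hi) :
    insortLoopB a x lo hi = lo := by
  rw [insortLoopB]
  simp [h]

lemma insortLoopB_spec (a : List Int) (x : Int) (hs : a.Pairwise (· ≤ ·)) :
    ∀ (n : Nat) (lo hi : Int), (hi - lo).toNat = n → 0 ≤ lo → lo ≤ hi → (hi ≤ (a.length : Int)) →
      (∀ (i : Nat) (h : i < a.length), (i : Int) < lo → a[i] ≤ x) →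
      (∀ (i : Nat) (h : i < a.length), hi ≤ (i : Int) → x < a[i]) →
      0 ≤ insortLoopB a x lo hi ∧ insortLoopB a x lo hi ≤ (a.length : Int) ∧
        (∀ (i : Nat) (h : i < a.length), (i : Int) < insortLoopB a x lo hi → a[i] ≤ x) ∧
        (∀ (i : Nat) (h : i < a.length), insortLoopB a x lo hi ≤ (i : Int) → x < a[i]) := by
  intro n
  induction n using Nat.strong_induction_on with
  | _ n ih =>
      intro lo hi hn h0 hlohi hhi hbelow habove
      by_cases h : lo < hi
      · rw [insortLoopB_step a x lo hi h]
        have hb := PySem.Int.floordiv_two_mid_bounds (le_of_lt h)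
        have hmlt : PySem.Int.floordiv (lo + hi) 2 < hi :=
          (PySem.Int.floordiv_lt_iff_lt_mul (by omega)).mpr (by omega)
        set m := PySem.Int.floordiv (lo + hi) 2 with hm
        have hmn : m.toNat < a.length := by omega
        have hget : PySem.List.pyGetD a m 0 = a[m.toNat] := by
          rw [PySem.List.pyGetD_of_nonneg a 0 (by omega), List.getD_eq_getElem a 0 hmn]
        rw [hget]
        have hpw := List.pairwise_iff_getElem.mp hs
        by_cases hc : a[m.toNat] ≤ x
        · rw [if_pos hc]
          refine ih (hi - (m + 1)).toNat (by omega) (m + 1) hi rfl (by omega) (by omega) hhi ?_ habove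
          intro i hilen hilt
          by_cases hio : (i : Int) < lo
          · exact hbelow i hilen hio
          · rcases eq_or_lt_of_le (show i ≤ m.toNat by omega) with he | hl
            · subst he; exact hc
            · exact le_trans (hpw i m.toNat hilen hmn hl) hc
        · rw [if_neg hc]
          refine ih (m - lo).toNat (by omega) lo m rfl h0 (by omega) (by omega) hbelow ?_
          intro i hilen hile
          rcases eq_or_lt_of_le (show m.toNat ≤ i by omega) with he | hl
          · subst he; omega
          · have h1 : x < a[m.toNat] := by omega
            exact lt_of_lt_of_le h1 (hpw m.toNat i hmn hilen hl)
      · rw [insortLoopB_stop a x lo hi h]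
        have : lo = hi := by omega
        exact ⟨h0, by omega, fun i hi1 hi2 => hbelow i hi1 hi2, fun i hi1 hi2 => habove i hi1 (by omega)⟩

-- _insort splits the sorted list at a point n with everything before ≤ x and after > x
lemma insortB_split (a : List Int) (x : Int) (hs : a.Pairwise (· ≤ ·)) :
    ∃ n : Nat, n ≤ a.length ∧ insortB a x = a.take n ++ [x] ++ a.drop n ∧
      (∀ y ∈ a.take n, y ≤ x) ∧ (∀ z ∈ a.drop n, x < z) := by
  obtain ⟨h0, hle, hbelow, habove⟩ :=
    insortLoopB_spec a x hs ((a.length : Int) - 0).toNat 0 (a.length : Int) rfl le_rfl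
      (by omega) le_rfl (by intro i h hi; omega) (by intro i h hi; omega)
  set r := insortLoopB a x 0 (a.length : Int) with hr
  refine ⟨r.toNat, by omega, ?_, ?_, ?_⟩
  · show PySem.List.slice a none (some r) ++ [x] ++ PySem.List.slice a (some r) none
        = a.take r.toNat ++ [x] ++ a.drop r.toNat
    rw [PySem.List.slice_to a h0, PySem.List.slice_from a h0]
  · intro y hy
    obtain ⟨i, hilen, hieq⟩ := List.mem_iff_getElem.mp hy
    have hlen : i < a.length := by
      have := List.length_take_le r.toNat a; omega
    rw [← hieq, List.getElem_take]
    apply hbelow i hlen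
    have := hilen; simp [List.length_take] at this; omega
  · intro z hz
    obtain ⟨i, hilen, hieq⟩ := List.mem_iff_getElem.mp hz
    have hlen2 : r.toNat + i < a.length := by
      have : (List.drop r.toNat a).length = a.length - r.toNat := List.length_drop; omega
    rw [← hieq, List.getElem_drop]
    apply habove (r.toNat + i) hlen2
    omega

lemma insortB_perm (a : List Int) (x : Int) (hs : a.Pairwise (· ≤ ·)) :
    (insortB a x).Perm (x :: a) := by
  obtain ⟨n, _, heq, _, _⟩ := insortB_split a x hs
  rw [heq]
  calc (a.take n ++ [x] ++ a.drop n).Perm ((x :: a.take n) ++ a.drop n) :=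
        (List.perm_append_singleton x _).append_right _
    _ = x :: (a.take n ++ a.drop n) := by rw [List.cons_append]
    _ = x :: a := by rw [List.take_append_drop]

lemma insortB_sorted (a : List Int) (x : Int) (hs : a.Pairwise (· ≤ ·)) :
    (insortB a x).Pairwise (· ≤ ·) := by
  obtain ⟨n, _, heq, hbelow, habove⟩ := insortB_split a x hs
  rw [heq]
  rw [List.pairwise_append]
  refine ⟨?_, List.Pairwise.sublist (List.drop_sublist n a) hs, ?_⟩
  · rw [List.pairwise_append]
    refine ⟨List.Pairwise.sublist (List.take_sublist n a) hs, List.pairwise_singleton _ _, ?_⟩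
    intro y hy z hz
    rw [List.mem_singleton.mp hz]
    exact hbelow y hy
  · intro y hy z hz
    rcases List.mem_append.mp hy with hy | hy
    · exact le_trans (hbelow y hy) (le_of_lt (habove z hz))
    · rw [List.mem_singleton.mp hy]
      exact le_of_lt (habove z hz)

lemma insortB_ne_nil (a : List Int) (x : Int) : insortB a x ≠ [] := by
  simp [insortB]

-- min of any permutation of a sorted nonempty list is its head
lemma min?_of_perm_sorted (xs : List Int) (h : Int) (t : List Int)
    (hp : xs.Perm (h :: t)) (hs : (h :: t).Pairwise (· ≤ ·)) :
    PySem.List.min? xs (fun x => x) = some h := by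
  have hne : xs ≠ [] := by
    intro he; subst he; simpa using hp.length_eq
  cases hm : PySem.List.min? xs (fun x => x) with
  | none => exact absurd ((PySem.List.min?_eq_none_iff xs _).mp hm) hne
  | some m =>
      have hmem : m ∈ xs := PySem.List.min?_mem hm
      have hmin := PySem.List.min?_isMin hm
      have hmh : m ≤ h := hmin h (hp.symm.subset (List.mem_cons_self ..))
      have hhm : h ≤ m := by
        rcases List.mem_cons.mp (hp.subset hmem) with rfl | hm1
        · exact le_refl _
        · exact (List.pairwise_cons.mp hs).1 m hm1
      have : m = h := le_antisymm hmh hhm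
      rw [this]

-- the loop invariant: A's (answer, honor) and B's (heap, answer) stay related
lemma loop_inv (k : Int) (hk : 1 ≤ k) :
    ∀ (rest : List Int) (idx : Int) (ans honorA heapB : List Int),
      honorA.Perm heapB →
      heapB.Pairwise (· ≤ ·) →
      (honorA.length : Int) = min idx k →
      ((PySem.List.enumerate rest idx).foldl (solutionStepA k) (ans, honorA)).1
        = (rest.foldl (solutionStepB k) (heapB, ans)).2 := by
  intro rest
  induction rest with
  | nil => intro idx ans honorA heapB _ _ _; simp [PySem.List.enumerate_nil]
  | cons v rest ih =>
      intro idx ans honorA heapB hperm hsort hlen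
      rw [PySem.List.enumerate_cons, List.foldl_cons, List.foldl_cons]
      have hlenB : (heapB.length : Int) = min idx k := by
        rw [← hperm.length_eq]; exact hlen
      by_cases hlt : idx < k
      · -- append branch on both sides
        have hminik : min idx k = idx := by omega
        have hBlt : (heapB.length : Int) < k := by omega
        -- new states
        set heap' := insortB heapB v with hheap'
        obtain ⟨h', t', hht⟩ : ∃ h' t', heap' = h' :: t' := by
          cases hh : heap' with
          | nil => exact absurd hh (insortB_ne_nil _ _)
          | cons a b => exact ⟨a, b, rfl⟩
        have hperm' : (honorA ++ [v]).Perm heap' :=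
          ((List.perm_append_singleton v honorA).trans (hperm.cons v)).trans
            (insortB_perm heapB v hsort).symm
        have hsort' : heap'.Pairwise (· ≤ ·) := insortB_sorted heapB v hsort
        have hmin' : PySem.List.min? (honorA ++ [v]) (fun x => x) = some h' :=
          min?_of_perm_sorted _ h' t' (hht ▸ hperm') (hht ▸ hsort')
        have hA : solutionStepA k (ans, honorA) (idx, v) = (ans ++ [h'], honorA ++ [v]) := by
          simp only [solutionStepA, hlt, if_pos, hmin']
        have hB : solutionStepB k (heapB, ans) v = (heap', ans ++ [h']) := by
          simp only [solutionStepB, hBlt, if_pos]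
          rw [show insortB heapB v = h' :: t' from hht, hht]
          rfl
        rw [hA, hB]
        apply ih (idx + 1) _ _ heap' hperm' hsort'
        have : (honorA.length : Int) = idx := by omega
        simp only [List.length_append, List.length_singleton]
        push_cast
        omega
      · -- full honor roll: length = k ≥ 1
        have hminik : min idx k = k := by omega
        have hnil : honorA.length ≠ 0 := by omega
        obtain ⟨h, t, hht⟩ : ∃ h t, heapB = h :: t := by
          cases hh : heapB with
          | nil => exfalso; apply hnil; rw [hperm.length_eq, hh]; rfl
          | cons a b => exact ⟨a, b, rfl⟩
        have hsortc := List.pairwise_cons.mp (hht ▸ hsort)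
        have hminA : PySem.List.min? honorA (fun x => x) = some h :=
          min?_of_perm_sorted _ h t (hht ▸ hperm) (hht ▸ hsort)
        have hBnlt : ¬ (heapB.length : Int) < k := by omega
        by_cases hv : h < v
        · -- replace the minimum
          have hmemA : h ∈ honorA := hperm.symm.subset (hht ▸ List.mem_cons_self ..)
          have hrem : PySem.List.remove? honorA h = some (honorA.erase h) :=
            PySem.List.remove?_eq_some_erase honorA h hmemA
          have hpermE : (honorA.erase h).Perm t := by
            have := hperm.erase h
            rw [hht] at this
            simpa using this
          set heap' := insortB t v with hheap'
          obtain ⟨h', t', hht'⟩ : ∃ h' t', heap' = h' :: t' := by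
            cases hh : heap' with
            | nil => exact absurd hh (insortB_ne_nil _ _)
            | cons a b => exact ⟨a, b, rfl⟩
          have hperm' : (honorA.erase h ++ [v]).Perm heap' :=
            ((List.perm_append_singleton v _).trans (hpermE.cons v)).trans
              (insortB_perm t v hsortc.2).symm
          have hsort' : heap'.Pairwise (· ≤ ·) := insortB_sorted t v hsortc.2
          have hmin' : PySem.List.min? (honorA.erase h ++ [v]) (fun x => x) = some h' :=
            min?_of_perm_sorted _ h' t' (hht' ▸ hperm') (hht' ▸ hsort')
          have hA : solutionStepA k (ans, honorA) (idx, v)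
              = (ans ++ [h'], honorA.erase h ++ [v]) := by
            simp only [solutionStepA, hlt, hminA, hrem, hv, if_pos]
            simp [hmin']
          have hB : solutionStepB k (heapB, ans) v = (heap', ans ++ [h']) := by
            rw [hht] at hBnlt
            rw [hht]
            simp only [solutionStepB, if_neg hBnlt, if_pos hv]
            rw [show PySem.List.slice (h :: t) (some 1) none = t by
                  rw [PySem.List.slice_from _ (by omega)]; rfl]
            rw [show insortB t v = h' :: t' from hht', hht']
            rfl
          rw [hA, hB]
          apply ih (idx + 1) _ _ heap' hperm' hsort'
          have hle : (honorA.erase h).length = honorA.length - 1 :=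
            List.length_erase_of_mem hmemA
          simp only [List.length_append, List.length_singleton, hle]
          have : 1 ≤ honorA.length := by omega
          push_cast [Nat.sub_add_cancel this]
          omega
        · -- keep the roll unchanged
          have hA : solutionStepA k (ans, honorA) (idx, v) = (ans ++ [h], honorA) := by
            simp only [solutionStepA, hlt, hminA, hv]
            simp [hminA]
          have hB : solutionStepB k (heapB, ans) v = (heapB, ans ++ [h]) := by
            rw [hht] at hBnlt ⊢
            simp only [solutionStepB, if_neg hBnlt, if_neg hv]
            rfl
          rw [hA, hB]
          apply ih (idx + 1) _ _ heapB hperm hsort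
          omega

-- ===== VERDICT (by name: the statement is the Claim_ definition above) =====
theorem solution_spec : Claim_equal_solution := by
  intro k score _hdom hpre
  unfold Spec_solution solution solution_alt
  rcases hpre with hnil | hk
  · subst hnil; rfl
  · exact loop_inv k hk score 0 [] [] [] (List.Perm.refl _) (by simp) (by simp [min_def]; omega)
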